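-- pv_equiv track=rewrite | github.com/jerrylususu/projectsflsmusic | helpers.py | langback
-- ===== SOURCE A (Python) =====
-- def langback(s):
--
--         if s == None:
--             return None
--
--         else:
--             for old, new in [("1chn", "中文"), ("2eng", "英文"), ("3jpn", "日文"), ("4elect", "电音"),
--                 ("5pure", "纯音乐"), ("6other", "其它")]:
--                 s = s.replace(old, new)
--             return s
-- ===== SOURCE B (Python) =====
-- _LANG_BY_HEAD = {
--     "1": ("1chn", "中文"),
--     "2": ("2eng", "英文"),
--     "3": ("3jpn", "日文"),
--     "4": ("4elect", "电音"),
--     "5": ("5pure", "纯音乐"),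
--     "6": ("6other", "其它"),
-- }
--
-- def langback(s):
--     if s is None:
--         return None
--     out = []
--     i = 0
--     n = len(s)
--     while i < n:
--         ent = _LANG_BY_HEAD.get(s[i])
--         if ent is not None and s.startswith(ent[0], i):
--             out.append(ent[1])
--             i += len(ent[0])
--         else:
--             out.append(s[i])
--             i += 1
--     return "".join(out)
-- ===== Notes on version B (the rewrite author's own statement) =====
-- stated objective: alternative
-- what changed: A makes six sequential full-string .replace passes; B makes a single left-to-right scan over the string, dispatching on the current character through a lookup table keyed by each tag's first character and emitting the Chinese label on a tag match.
import Mathlib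
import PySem

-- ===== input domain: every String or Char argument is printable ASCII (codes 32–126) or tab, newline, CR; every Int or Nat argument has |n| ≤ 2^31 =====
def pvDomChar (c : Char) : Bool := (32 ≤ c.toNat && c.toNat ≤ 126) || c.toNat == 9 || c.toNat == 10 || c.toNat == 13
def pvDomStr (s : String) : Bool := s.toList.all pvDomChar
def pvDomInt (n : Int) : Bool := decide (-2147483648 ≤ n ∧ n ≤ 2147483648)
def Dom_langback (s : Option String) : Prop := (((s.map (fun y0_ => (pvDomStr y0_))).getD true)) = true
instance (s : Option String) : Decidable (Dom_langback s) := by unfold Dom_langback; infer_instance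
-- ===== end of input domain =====

-- B replaces A's six sequential full-string `.replace` passes by a single left-to-right scan
-- consulting a first-character lookup table (objective: alternative single-pass algorithm).

-- ===== PORT A =====
-- A: for old, new in [...]: s = s.replace(old, new)  — six sequential replace passes, as a foldl.
def langback (s : Option String) : Option String :=
  match s with
  | none => none
  | some s =>
      some (List.foldl (fun acc (p : String × String) => PySem.Str.replace acc p.1 p.2) s
        [("1chn", "中文"), ("2eng", "英文"), ("3jpn", "日文"), ("4elect", "电音"),
         ("5pure", "纯音乐"), ("6other", "其它")])

-- ===== PORT B =====
-- Source B's _LANG_BY_HEAD: encoded tag and Chinese label, keyed by the tag's first character.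
def langTable : PySem.Dict Char (List Char × List Char) :=
  PySem.Dict.ofList
    [('1', (['1','c','h','n'], ['中','文'])),
     ('2', (['2','e','n','g'], ['英','文'])),
     ('3', (['3','j','p','n'], ['日','文'])),
     ('4', (['4','e','l','e','c','t'], ['电','音'])),
     ('5', (['5','p','u','r','e'], ['纯','音','乐'])),
     ('6', (['6','o','t','h','e','r'], ['其','它']))]

-- Source B's while loop over positions, as recursion on the remaining characters: the dict lookup
-- on the current char, then `s.startswith(tag, i)`; on a hit, skip the tag (i += len(tag), i.e.
-- drop the remaining len(tag)-1 chars of the tail) and emit the label, else emit the char.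
def scanB (cs : List Char) : List Char :=
  match cs with
  | [] => []
  | c :: t =>
      match langTable.get? c with
      | some ent =>
          if ent.1.isPrefixOf (c :: t) then ent.2 ++ scanB (t.drop (ent.1.length - 1))
          else c :: scanB t
      | none => c :: scanB t
termination_by cs.length
decreasing_by
  all_goals (simp only [List.length_cons, List.length_drop]; omega)

def langback_alt (s : Option String) : Option String :=
  match s with
  | none => none
  | some s => some (String.ofList (scanB s.toList))

-- ===== PRECONDITION & SPEC =====
def Spec_langback (s : Option String) (out : Option String) : Prop := out = langback_alt s
instance (s : Option String) (out : Option String) : Decidable (Spec_langback s out) := by unfold Spec_langback; infer_instance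

-- ===== CLAIM (what is proved, stated in full; the proofs are below) =====
def Claim_equal_langback : Prop := ∀ (s : Option String), Dom_langback s → Spec_langback s (langback s)

-- ===== LEMMAS AND PROOFS =====

-- Fuel-free specification of one Python `str.replace` pass (old nonempty).
def repC (o n : List Char) : List Char → List Char
  | [] => []
  | c :: t =>
      if o.isPrefixOf (c :: t) then n ++ repC o n (t.drop (o.length - 1))
      else c :: repC o n t
termination_by cs => cs.length
decreasing_by
  all_goals (simp only [List.length_cons, List.length_drop]; omega)

theorem repC_nil (o n : List Char) : repC o n [] = [] := by simp [repC]

theorem repC_cons_not_prefix {o : List Char} (n : List Char) {c : Char} {t : List Char}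
    (h : ¬ o <+: (c :: t)) : repC o n (c :: t) = c :: repC o n t := by
  rw [repC, if_neg]
  simpa [List.isPrefixOf_iff_prefix] using h

theorem repC_cons_ne {o0 : Char} (o' n : List Char) {c : Char} (t : List Char)
    (h : c ≠ o0) : repC (o0 :: o') n (c :: t) = c :: repC (o0 :: o') n t := by
  apply repC_cons_not_prefix
  intro hp
  exact h ((List.cons_prefix_cons.mp hp).1.symm)

theorem repC_append_not_mem {o0 : Char} (o' n : List Char) {u : List Char} (x : List Char)
    (h : o0 ∉ u) : repC (o0 :: o') n (u ++ x) = u ++ repC (o0 :: o') n x := by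
  induction u with
  | nil => rfl
  | cons c u ih =>
      have hc : c ≠ o0 := by intro he; exact h (he ▸ List.mem_cons_self)
      have hu : o0 ∉ u := fun hm => h (List.mem_cons_of_mem _ hm)
      simp only [List.cons_append, repC_cons_ne _ _ _ hc, ih hu]

theorem repC_prefix_self (o0 : Char) (o' n x : List Char) :
    repC (o0 :: o') n ((o0 :: o') ++ x) = n ++ repC (o0 :: o') n x := by
  rw [List.cons_append, repC, if_pos]
  · simp
  · exact List.isPrefixOf_iff_prefix.mpr ⟨x, by simp⟩

-- `agree x y`: y equals x, or they share a prefix and y's first deviation is a non-ASCII char.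
def agree (x y : List Char) : Prop :=
  y = x ∨ ∃ u ch r, u <+: x ∧ 127 < ch.toNat ∧ y = u ++ ch :: r

theorem agree_refl (x : List Char) : agree x x := Or.inl rfl

theorem agree_cons (c : Char) {x y : List Char} (h : agree x y) : agree (c :: x) (c :: y) := by
  rcases h with h | ⟨u, ch, r, hu, hch, hy⟩
  · exact Or.inl (by rw [h])
  · exact Or.inr ⟨c :: u, ch, r, List.cons_prefix_cons.mpr ⟨rfl, hu⟩, hch, by simp [hy]⟩

theorem agree_trans {x y z : List Char} (h1 : agree x y) (h2 : agree y z) : agree x z := by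
  rcases h2 with h2 | ⟨u, ch, r, hu, hch, hz⟩
  · exact h2 ▸ h1
  · rcases h1 with h1 | ⟨v, ch', r', hv, hch', hy⟩
    · exact Or.inr ⟨u, ch, r, h1 ▸ hu, hch, hz⟩
    · by_cases hl : u.length ≤ v.length
      · refine Or.inr ⟨u, ch, r, ?_, hch, hz⟩
        exact (List.prefix_of_prefix_length_le (hy ▸ hu : u <+: v ++ ch' :: r')
          (⟨ch' :: r', rfl⟩ : v <+: v ++ ch' :: r') hl).trans hv
      · -- v is a proper prefix of u inside y, so z = v ++ ch' :: …
        have hvu : v ++ [ch'] <+: u := by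
          refine List.prefix_of_prefix_length_le ?_ (hy ▸ hu) ?_
          · exact ⟨r', by simp⟩
          · simp; omega
        rcases hvu with ⟨w, hw⟩
        refine Or.inr ⟨v, ch', w ++ ch :: r, hv, hch', ?_⟩
        rw [hz, ← hw]; simp

theorem prefix_of_agree {x y tag : List Char} (h : agree x y)
    (hascii : tag.all (fun c => decide (c.toNat ≤ 127)) = true) (hp : tag <+: y) :
    tag <+: x := by
  rcases h with h | ⟨u, ch, r, hu, hch, hy⟩
  · exact h ▸ hp
  · by_cases hl : tag.length ≤ u.length
    · exact (List.prefix_of_prefix_length_le (hy ▸ hp) ⟨ch :: r, rfl⟩ hl).trans hu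
    · exfalso
      have huc : u ++ [ch] <+: tag := by
        refine List.prefix_of_prefix_length_le ⟨r, by simp⟩ (hy ▸ hp) ?_
        simp; omega
      have hmem : ch ∈ tag := huc.subset (by simp)
      have := of_decide_eq_true (List.all_eq_true.mp hascii ch hmem)
      omega

theorem repC_agree (o : List Char) (ch : Char) (n' : List Char) (hch : 127 < ch.toNat) :
    ∀ x, agree x (repC o (ch :: n') x) := by
  intro x
  induction hx : x.length using Nat.strong_induction_on generalizing x with
  | _ m ih =>
    match x with
    | [] => rw [repC_nil]; exact agree_refl []
    | c :: t =>
      rw [repC]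
      split
      · exact Or.inr ⟨[], ch, n' ++ repC o (ch :: n') (t.drop (o.length - 1)),
          List.nil_prefix, hch, by simp⟩
      · exact agree_cons c (ih t.length (by simp at hx; omega) t rfl)

-- The composition of the six replace passes, innermost first (A's fold, in spec form).
def chain (s : List Char) : List Char :=
  repC ['6','o','t','h','e','r'] ['其','它']
    (repC ['5','p','u','r','e'] ['纯','音','乐']
      (repC ['4','e','l','e','c','t'] ['电','音']
        (repC ['3','j','p','n'] ['日','文']
          (repC ['2','e','n','g'] ['英','文']
            (repC ['1','c','h','n'] ['中','文'] s)))))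

theorem chain_nil : chain [] = [] := by simp [chain, repC_nil]

theorem agree_chain_partial (s : List Char) :
    agree s (repC ['1','c','h','n'] ['中','文'] s)
    ∧ agree s (repC ['2','e','n','g'] ['英','文'] (repC ['1','c','h','n'] ['中','文'] s))
    ∧ agree s (repC ['3','j','p','n'] ['日','文'] (repC ['2','e','n','g'] ['英','文']
        (repC ['1','c','h','n'] ['中','文'] s)))
    ∧ agree s (repC ['4','e','l','e','c','t'] ['电','音'] (repC ['3','j','p','n'] ['日','文']
        (repC ['2','e','n','g'] ['英','文'] (repC ['1','c','h','n'] ['中','文'] s))))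
    ∧ agree s (repC ['5','p','u','r','e'] ['纯','音','乐'] (repC ['4','e','l','e','c','t'] ['电','音']
        (repC ['3','j','p','n'] ['日','文'] (repC ['2','e','n','g'] ['英','文']
          (repC ['1','c','h','n'] ['中','文'] s))))) := by
  have h1 := repC_agree ['1','c','h','n'] '中' ['文'] (by decide) s
  have h2 := agree_trans h1 (repC_agree ['2','e','n','g'] '英' ['文'] (by decide) _)
  have h3 := agree_trans h2 (repC_agree ['3','j','p','n'] '日' ['文'] (by decide) _)
  have h4 := agree_trans h3 (repC_agree ['4','e','l','e','c','t'] '电' ['音'] (by decide) _)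
  have h5 := agree_trans h4 (repC_agree ['5','p','u','r','e'] '纯' ['音','乐'] (by decide) _)
  exact ⟨h1, h2, h3, h4, h5⟩

theorem chain_cons_of_not_prefix {c : Char} {t : List Char}
    (h1 : ¬ ['1','c','h','n'] <+: (c :: t)) (h2 : ¬ ['2','e','n','g'] <+: (c :: t))
    (h3 : ¬ ['3','j','p','n'] <+: (c :: t)) (h4 : ¬ ['4','e','l','e','c','t'] <+: (c :: t))
    (h5 : ¬ ['5','p','u','r','e'] <+: (c :: t)) (h6 : ¬ ['6','o','t','h','e','r'] <+: (c :: t)) :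
    chain (c :: t) = c :: chain t := by
  obtain ⟨a1, a2, a3, a4, a5⟩ := agree_chain_partial t
  unfold chain
  rw [repC_cons_not_prefix _ h1,
      repC_cons_not_prefix _ (fun hp => h2 (prefix_of_agree (agree_cons c a1) (by decide) hp)),
      repC_cons_not_prefix _ (fun hp => h3 (prefix_of_agree (agree_cons c a2) (by decide) hp)),
      repC_cons_not_prefix _ (fun hp => h4 (prefix_of_agree (agree_cons c a3) (by decide) hp)),
      repC_cons_not_prefix _ (fun hp => h5 (prefix_of_agree (agree_cons c a4) (by decide) hp)),
      repC_cons_not_prefix _ (fun hp => h6 (prefix_of_agree (agree_cons c a5) (by decide) hp))]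

theorem chain_tag1 (x : List Char) :
    chain (['1','c','h','n'] ++ x) = ['中','文'] ++ chain x := by
  unfold chain
  rw [repC_prefix_self,
      repC_append_not_mem (u := ['中','文']) _ _ _ (by decide),
      repC_append_not_mem (u := ['中','文']) _ _ _ (by decide),
      repC_append_not_mem (u := ['中','文']) _ _ _ (by decide),
      repC_append_not_mem (u := ['中','文']) _ _ _ (by decide),
      repC_append_not_mem (u := ['中','文']) _ _ _ (by decide)]

theorem chain_tag2 (x : List Char) :
    chain (['2','e','n','g'] ++ x) = ['英','文'] ++ chain x := by
  unfold chain
  rw [repC_append_not_mem (u := ['2','e','n','g']) _ _ _ (by decide),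
      repC_prefix_self,
      repC_append_not_mem (u := ['英','文']) _ _ _ (by decide),
      repC_append_not_mem (u := ['英','文']) _ _ _ (by decide),
      repC_append_not_mem (u := ['英','文']) _ _ _ (by decide),
      repC_append_not_mem (u := ['英','文']) _ _ _ (by decide)]

theorem chain_tag3 (x : List Char) :
    chain (['3','j','p','n'] ++ x) = ['日','文'] ++ chain x := by
  unfold chain
  rw [repC_append_not_mem (u := ['3','j','p','n']) _ _ _ (by decide),
      repC_append_not_mem (u := ['3','j','p','n']) _ _ _ (by decide),
      repC_prefix_self,
      repC_append_not_mem (u := ['日','文']) _ _ _ (by decide),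
      repC_append_not_mem (u := ['日','文']) _ _ _ (by decide),
      repC_append_not_mem (u := ['日','文']) _ _ _ (by decide)]

theorem chain_tag4 (x : List Char) :
    chain (['4','e','l','e','c','t'] ++ x) = ['电','音'] ++ chain x := by
  unfold chain
  rw [repC_append_not_mem (u := ['4','e','l','e','c','t']) _ _ _ (by decide),
      repC_append_not_mem (u := ['4','e','l','e','c','t']) _ _ _ (by decide),
      repC_append_not_mem (u := ['4','e','l','e','c','t']) _ _ _ (by decide),
      repC_prefix_self,
      repC_append_not_mem (u := ['电','音']) _ _ _ (by decide),
      repC_append_not_mem (u := ['电','音']) _ _ _ (by decide)]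

theorem chain_tag5 (x : List Char) :
    chain (['5','p','u','r','e'] ++ x) = ['纯','音','乐'] ++ chain x := by
  unfold chain
  rw [repC_append_not_mem (u := ['5','p','u','r','e']) _ _ _ (by decide),
      repC_append_not_mem (u := ['5','p','u','r','e']) _ _ _ (by decide),
      repC_append_not_mem (u := ['5','p','u','r','e']) _ _ _ (by decide),
      repC_append_not_mem (u := ['5','p','u','r','e']) _ _ _ (by decide),
      repC_prefix_self,
      repC_append_not_mem (u := ['纯','音','乐']) _ _ _ (by decide)]

theorem chain_tag6 (x : List Char) :
    chain (['6','o','t','h','e','r'] ++ x) = ['其','它'] ++ chain x := by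
  unfold chain
  rw [repC_append_not_mem (u := ['6','o','t','h','e','r']) _ _ _ (by decide),
      repC_append_not_mem (u := ['6','o','t','h','e','r']) _ _ _ (by decide),
      repC_append_not_mem (u := ['6','o','t','h','e','r']) _ _ _ (by decide),
      repC_append_not_mem (u := ['6','o','t','h','e','r']) _ _ _ (by decide),
      repC_append_not_mem (u := ['6','o','t','h','e','r']) _ _ _ (by decide),
      repC_prefix_self]

theorem get?_langTable_none {c : Char} (h1 : c ≠ '1') (h2 : c ≠ '2') (h3 : c ≠ '3')
    (h4 : c ≠ '4') (h5 : c ≠ '5') (h6 : c ≠ '6') : langTable.get? c = none := by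
  have hit : langTable.items =
      [('1', (['1','c','h','n'], ['中','文'])),
       ('2', (['2','e','n','g'], ['英','文'])),
       ('3', (['3','j','p','n'], ['日','文'])),
       ('4', (['4','e','l','e','c','t'], ['电','音'])),
       ('5', (['5','p','u','r','e'], ['纯','音','乐'])),
       ('6', (['6','o','t','h','e','r'], ['其','它']))] := by decide
  rw [PySem.Dict.get?, hit]
  simp [List.find?_eq_none, beq_iff_eq]
  exact ⟨Ne.symm h1, Ne.symm h2, Ne.symm h3, Ne.symm h4, Ne.symm h5, Ne.symm h6⟩

theorem scanB_cons_of_not_prefix {c : Char} {t : List Char}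
    (h1 : ¬ ['1','c','h','n'] <+: (c :: t)) (h2 : ¬ ['2','e','n','g'] <+: (c :: t))
    (h3 : ¬ ['3','j','p','n'] <+: (c :: t)) (h4 : ¬ ['4','e','l','e','c','t'] <+: (c :: t))
    (h5 : ¬ ['5','p','u','r','e'] <+: (c :: t)) (h6 : ¬ ['6','o','t','h','e','r'] <+: (c :: t)) :
    scanB (c :: t) = c :: scanB t := by
  by_cases hc1 : c = '1'
  · subst hc1
    rw [scanB, show langTable.get? '1' = some (['1','c','h','n'], ['中','文']) from by decide]
    simp only
    rw [if_neg (by simpa [List.isPrefixOf_iff_prefix] using h1)]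
  · by_cases hc2 : c = '2'
    · subst hc2
      rw [scanB, show langTable.get? '2' = some (['2','e','n','g'], ['英','文']) from by decide]
      simp only
      rw [if_neg (by simpa [List.isPrefixOf_iff_prefix] using h2)]
    · by_cases hc3 : c = '3'
      · subst hc3
        rw [scanB, show langTable.get? '3' = some (['3','j','p','n'], ['日','文']) from by decide]
        simp only
        rw [if_neg (by simpa [List.isPrefixOf_iff_prefix] using h3)]
      · by_cases hc4 : c = '4'
        · subst hc4
          rw [scanB, show langTable.get? '4' = some (['4','e','l','e','c','t'], ['电','音']) from by decide]
          simp only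
          rw [if_neg (by simpa [List.isPrefixOf_iff_prefix] using h4)]
        · by_cases hc5 : c = '5'
          · subst hc5
            rw [scanB, show langTable.get? '5' = some (['5','p','u','r','e'], ['纯','音','乐']) from by decide]
            simp only
            rw [if_neg (by simpa [List.isPrefixOf_iff_prefix] using h5)]
          · by_cases hc6 : c = '6'
            · subst hc6
              rw [scanB, show langTable.get? '6' = some (['6','o','t','h','e','r'], ['其','它']) from by decide]
              simp only
              rw [if_neg (by simpa [List.isPrefixOf_iff_prefix] using h6)]
            · rw [scanB, get?_langTable_none hc1 hc2 hc3 hc4 hc5 hc6]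

theorem scanB_nil : scanB [] = [] := by rw [scanB]

theorem chain_eq_scanB : ∀ s : List Char, chain s = scanB s := by
  suffices H : ∀ m s, (s : List Char).length ≤ m → chain s = scanB s by
    intro s; exact H s.length s le_rfl
  intro m
  induction m with
  | zero =>
      intro s hs
      rw [List.length_eq_zero_iff.mp (Nat.le_zero.mp hs), chain_nil, scanB_nil]
  | succ m ih =>
      intro s hs
      match s with
      | [] => rw [chain_nil, scanB_nil]
      | c :: t =>
        by_cases h1 : ['1','c','h','n'] <+: (c :: t)
        · obtain ⟨x, hx⟩ := h1
          rw [List.cons_append] at hx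
          injection hx with hc ht
          subst hc; subst ht
          rw [scanB, show langTable.get? '1' = some (['1','c','h','n'], ['中','文']) from by decide]
          simp only
          have hpre : (['1','c','h','n'] : List Char).isPrefixOf ('1' :: (['c','h','n'] ++ x)) = true :=
            List.isPrefixOf_iff_prefix.mpr ⟨x, rfl⟩
          rw [if_pos hpre]
          rw [show ((['c','h','n'] ++ x : List Char).drop ((['1','c','h','n'] : List Char).length - 1)) = x from rfl]
          have hxm : x.length ≤ m := by simp at hs; omega
          rw [← ih x hxm]
          exact chain_tag1 x
        · by_cases h2 : ['2','e','n','g'] <+: (c :: t)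
          · obtain ⟨x, hx⟩ := h2
            rw [List.cons_append] at hx
            injection hx with hc ht
            subst hc; subst ht
            rw [scanB, show langTable.get? '2' = some (['2','e','n','g'], ['英','文']) from by decide]
            simp only
            have hpre : (['2','e','n','g'] : List Char).isPrefixOf ('2' :: (['e','n','g'] ++ x)) = true :=
              List.isPrefixOf_iff_prefix.mpr ⟨x, rfl⟩
            rw [if_pos hpre]
            rw [show ((['e','n','g'] ++ x : List Char).drop ((['2','e','n','g'] : List Char).length - 1)) = x from rfl]
            have hxm : x.length ≤ m := by simp at hs; omega
            rw [← ih x hxm]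
            exact chain_tag2 x
          · by_cases h3 : ['3','j','p','n'] <+: (c :: t)
            · obtain ⟨x, hx⟩ := h3
              rw [List.cons_append] at hx
              injection hx with hc ht
              subst hc; subst ht
              rw [scanB, show langTable.get? '3' = some (['3','j','p','n'], ['日','文']) from by decide]
              simp only
              have hpre : (['3','j','p','n'] : List Char).isPrefixOf ('3' :: (['j','p','n'] ++ x)) = true :=
                List.isPrefixOf_iff_prefix.mpr ⟨x, rfl⟩
              rw [if_pos hpre]
              rw [show ((['j','p','n'] ++ x : List Char).drop ((['3','j','p','n'] : List Char).length - 1)) = x from rfl]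
              have hxm : x.length ≤ m := by simp at hs; omega
              rw [← ih x hxm]
              exact chain_tag3 x
            · by_cases h4 : ['4','e','l','e','c','t'] <+: (c :: t)
              · obtain ⟨x, hx⟩ := h4
                rw [List.cons_append] at hx
                injection hx with hc ht
                subst hc; subst ht
                rw [scanB, show langTable.get? '4' = some (['4','e','l','e','c','t'], ['电','音']) from by decide]
                simp only
                have hpre : (['4','e','l','e','c','t'] : List Char).isPrefixOf ('4' :: (['e','l','e','c','t'] ++ x)) = true :=
                  List.isPrefixOf_iff_prefix.mpr ⟨x, rfl⟩
                rw [if_pos hpre]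
                rw [show ((['e','l','e','c','t'] ++ x : List Char).drop ((['4','e','l','e','c','t'] : List Char).length - 1)) = x from rfl]
                have hxm : x.length ≤ m := by simp at hs; omega
                rw [← ih x hxm]
                exact chain_tag4 x
              · by_cases h5 : ['5','p','u','r','e'] <+: (c :: t)
                · obtain ⟨x, hx⟩ := h5
                  rw [List.cons_append] at hx
                  injection hx with hc ht
                  subst hc; subst ht
                  rw [scanB, show langTable.get? '5' = some (['5','p','u','r','e'], ['纯','音','乐']) from by decide]
                  simp only
                  have hpre : (['5','p','u','r','e'] : List Char).isPrefixOf ('5' :: (['p','u','r','e'] ++ x)) = true :=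
                    List.isPrefixOf_iff_prefix.mpr ⟨x, rfl⟩
                  rw [if_pos hpre]
                  rw [show ((['p','u','r','e'] ++ x : List Char).drop ((['5','p','u','r','e'] : List Char).length - 1)) = x from rfl]
                  have hxm : x.length ≤ m := by simp at hs; omega
                  rw [← ih x hxm]
                  exact chain_tag5 x
                · by_cases h6 : ['6','o','t','h','e','r'] <+: (c :: t)
                  · obtain ⟨x, hx⟩ := h6
                    rw [List.cons_append] at hx
                    injection hx with hc ht
                    subst hc; subst ht
                    rw [scanB, show langTable.get? '6' = some (['6','o','t','h','e','r'], ['其','它']) from by decide]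
                    simp only
                    have hpre : (['6','o','t','h','e','r'] : List Char).isPrefixOf ('6' :: (['o','t','h','e','r'] ++ x)) = true :=
                      List.isPrefixOf_iff_prefix.mpr ⟨x, rfl⟩
                    rw [if_pos hpre]
                    rw [show ((['o','t','h','e','r'] ++ x : List Char).drop ((['6','o','t','h','e','r'] : List Char).length - 1)) = x from rfl]
                    have hxm : x.length ≤ m := by simp at hs; omega
                    rw [← ih x hxm]
                    exact chain_tag6 x
                  · rw [chain_cons_of_not_prefix h1 h2 h3 h4 h5 h6,
                        scanB_cons_of_not_prefix h1 h2 h3 h4 h5 h6,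
                        ih t (by simp at hs; omega)]

-- Relate PySem's fuelled replace to repC.
theorem go_eq_repC (o n : List Char) (ho : o ≠ []) :
    ∀ fuel l acc, l.length ≤ fuel →
      PySem.Chars.replace.go o n fuel l acc = acc.reverse ++ repC o n l := by
  intro fuel
  induction fuel with
  | zero =>
      intro l acc hl
      rw [List.length_eq_zero_iff.mp (Nat.le_zero.mp hl)]
      rw [PySem.Chars.replace.go, repC_nil, List.append_nil]
  | succ fuel ih =>
      intro l acc hl
      match l with
      | [] =>
          rw [PySem.Chars.replace.go, repC_nil, List.append_nil]
          omega
      | c :: t =>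
        rw [PySem.Chars.replace.go]
        by_cases hp : o.isPrefixOf (c :: t)
        · rw [if_pos hp]
          have holen : 1 ≤ o.length := by
            cases o with
            | nil => exact absurd rfl ho
            | cons _ _ => simp
          have hdrop : (c :: t).drop o.length = t.drop (o.length - 1) := by
            cases o with
            | nil => exact absurd rfl ho
            | cons o0 o' => simp
          have hlen : ((c :: t).drop o.length).length ≤ fuel := by
            simp only [List.length_drop, List.length_cons]
            simp at hl; omega
          rw [ih _ _ hlen, hdrop, repC, if_pos hp]
          simp
        · rw [if_neg hp]
          have hlen : t.length ≤ fuel := by simp at hl; omega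
          rw [ih _ _ hlen, repC, if_neg hp]
          simp

theorem replace_eq_repC (s o n : List Char) (ho : o ≠ []) :
    PySem.Chars.replace s o n = repC o n s := by
  rw [PySem.Chars.replace, if_neg (by simpa [List.isEmpty_iff] using ho)]
  simpa using go_eq_repC o n ho s.length s [] le_rfl

-- ===== VERDICT (by name: the statement is the Claim_ definition above) =====
set_option maxHeartbeats 1000000 in
theorem langback_spec : Claim_equal_langback := by
  intro s _
  unfold Spec_langback
  match s with
  | none => rfl
  | some s =>
      unfold langback langback_alt
      simp only [List.foldl]
      refine congrArg some ?_
      apply String.toList_inj.mp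
      rw [String.toList_ofList]
      simp only [PySem.Str.toList_replace]
      rw [replace_eq_repC _ _ _ (by decide), replace_eq_repC _ _ _ (by decide),
          replace_eq_repC _ _ _ (by decide), replace_eq_repC _ _ _ (by decide),
          replace_eq_repC _ _ _ (by decide), replace_eq_repC _ _ _ (by decide)]
      rw [show ("1chn" : String).toList = ['1','c','h','n'] from by decide,
          show ("中文" : String).toList = ['中','文'] from by decide,
          show ("2eng" : String).toList = ['2','e','n','g'] from by decide,
          show ("英文" : String).toList = ['英','文'] from by decide,
          show ("3jpn" : String).toList = ['3','j','p','n'] from by decide,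
          show ("日文" : String).toList = ['日','文'] from by decide,
          show ("4elect" : String).toList = ['4','e','l','e','c','t'] from by decide,
          show ("电音" : String).toList = ['电','音'] from by decide,
          show ("5pure" : String).toList = ['5','p','u','r','e'] from by decide,
          show ("纯音乐" : String).toList = ['纯','音','乐'] from by decide,
          show ("6other" : String).toList = ['6','o','t','h','e','r'] from by decide,
          show ("其它" : String).toList = ['其','它'] from by decide]
      have := chain_eq_scanB s.toList
      unfold chain at this
      exact this
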